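-- pv_equiv track=rewrite | github.com/OanaBenec/PI | sources/Test.py | solve
-- ===== SOURCE A (Python) =====
-- def solve(input):
--     number = input['X']
--     aux = number
--     reverse = 0
--
--     while aux:
--         reverse = reverse * 10 + aux % 10
--         aux = aux // 10
--     if number != reverse:
--         return {'Z': 0}
--
--     div = 2
--     while div ** 2 <= number:
--         if number % div == 0:
--             return {'Z': 0}
--         div += 1
--
--     return {'Z': 1}
-- ===== SOURCE B (Python) =====
-- def solve(input):
--     number = input['X']
--     s = str(number)
--     if s != s[::-1]:
--         return {'Z': 0}
--     if number >= 4 and number % 2 == 0: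
--         return {'Z': 0}
--     d = 3
--     while d * d <= number and number % d:
--         d += 2
--     return {'Z': int(d * d > number)}
-- ===== Notes on version B (the rewrite author's own statement) =====
-- stated objective: alternative
-- what changed: The arithmetic digit-reversal palindrome loop is replaced by a string comparison str(number) == str(number)[::-1], and the early-return trial-division loop over all divisors from 2 is replaced by an even-number elimination followed by an odd-step scan (d = 3, 5, 7, ...) with a combined loop condition and no early return, deciding the answer from the final value of d.
import Mathlib
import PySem

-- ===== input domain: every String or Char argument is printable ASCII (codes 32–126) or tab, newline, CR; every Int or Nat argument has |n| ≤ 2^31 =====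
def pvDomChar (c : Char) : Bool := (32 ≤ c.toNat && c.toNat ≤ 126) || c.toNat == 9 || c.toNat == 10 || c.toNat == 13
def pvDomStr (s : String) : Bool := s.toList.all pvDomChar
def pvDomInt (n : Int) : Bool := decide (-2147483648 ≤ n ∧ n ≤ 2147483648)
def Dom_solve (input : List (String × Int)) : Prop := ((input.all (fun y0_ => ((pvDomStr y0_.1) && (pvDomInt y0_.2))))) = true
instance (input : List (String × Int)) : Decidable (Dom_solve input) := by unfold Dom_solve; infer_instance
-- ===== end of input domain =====

-- B replaces A's arithmetic digit-reversal palindrome loop by a string reversal test, and A's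
-- early-return trial division from 2 by an even-elimination plus an odd-step scan whose final
-- value of d decides the answer (alternative decomposition, same cost).

-- ===== PORT A =====
-- A's `while aux: reverse = reverse*10 + aux%10; aux = aux//10`, ported over Nat:
-- exact for 0 ≤ aux (Pre_solve); for negative X the Python loop never terminates, so A returns nothing there.
def pvRevLoop (aux reverse : Nat) : Nat :=
  if aux ≠ 0 then pvRevLoop (aux / 10) (reverse * 10 + aux % 10) else reverse
termination_by aux
decreasing_by exact Nat.div_lt_self (by omega) (by norm_num)

-- A's trial-division loop `div = 2; while div**2 <= number: if number % div == 0: return {'Z':0}; div += 1`,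
-- over Nat (exact for 0 ≤ number); `false` = a divisor was found (return {'Z':0}), `true` = fell through.
def pvPrimeLoop (number div : Nat) : Bool :=
  if div * div ≤ number then
    (if number % div = 0 then false else pvPrimeLoop number (div + 1))
  else true
termination_by number + 1 - div
decreasing_by
  have hdn : div ≤ number := by
    rcases Nat.eq_zero_or_pos div with h0 | h1
    · omega
    · exact le_trans (Nat.le_mul_of_pos_left div h1) (by assumption)
  omega

def solve (input : List (String × Int)) : List (String × Int) :=
  match PySem.Dict.get? (PySem.Dict.mk input) "X" with
  | none => []   -- input['X'] raises KeyError; excluded by Pre_solve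
  | some number =>
    let reverse : Int := (pvRevLoop number.toNat 0 : Nat)
    if number ≠ reverse then [("Z", 0)]
    else if pvPrimeLoop number.toNat 2 then [("Z", 1)] else [("Z", 0)]

-- ===== PORT B =====
-- B's `d = 3; while d*d <= number and number % d: d += 2`, over Nat (exact for 0 ≤ number):
-- returns the final value of d.
def pvOddScan (number d : Nat) : Nat :=
  if d * d ≤ number ∧ number % d ≠ 0 then pvOddScan number (d + 2) else d
termination_by number + 2 - d
decreasing_by
  have hdn : d ≤ number := by
    rcases Nat.eq_zero_or_pos d with h0 | h1
    · omega
    · exact le_trans (Nat.le_mul_of_pos_left d h1) (by omega)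
  omega

def solve_alt (input : List (String × Int)) : List (String × Int) :=
  match PySem.Dict.get? (PySem.Dict.mk input) "X" with
  | none => []   -- input['X'] raises KeyError; excluded by Pre_solve
  | some number =>
    let s := PySem.Int.toChars number            -- s = str(number), as its character list
    if s ≠ s.reverse then [("Z", 0)]             -- s != s[::-1]
    else if 4 ≤ number ∧ number % 2 = 0 then [("Z", 0)]
    else
      let d := pvOddScan number.toNat 3
      [("Z", if number < ((d * d : Nat) : Int) then 1 else 0)]   -- {'Z': int(d*d > number)}

-- ===== PRECONDITION & SPEC =====
-- Pre_ excludes inputs without a key "X" (A raises KeyError) and inputs with a negative X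
-- (A's digit-reversal loop never terminates there, so A returns no value).
def Pre_solve (input : List (String × Int)) : Prop :=
  0 ≤ (PySem.Dict.get? (PySem.Dict.mk input) "X").getD (-1)
instance (input : List (String × Int)) : Decidable (Pre_solve input) := by unfold Pre_solve; infer_instance
def pvWitness_solve : (List (String × Int)) := [("X", 131)]
def Spec_solve (input : List (String × Int)) (out : List (String × Int)) : Prop := out = solve_alt input
instance (input : List (String × Int)) (out : List (String × Int)) : Decidable (Spec_solve input out) := by unfold Spec_solve; infer_instance

-- ===== CLAIM (what is proved, stated in full; the proofs are below) =====
def Claim_equal_solve : Prop := ∀ (input : List (String × Int)), Dom_solve input → Pre_solve input → Spec_solve input (solve input)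

-- ===== LEMMAS AND PROOFS =====

-- A's loop computes the base-10 digit reversal of `aux` into the accumulator.
theorem pvRevLoop_eq (a r : Nat) :
    pvRevLoop a r = Nat.ofDigits 10 (Nat.digits 10 a).reverse + r * 10 ^ (Nat.digits 10 a).length := by
  fun_induction pvRevLoop a r with
  | case1 aux rev h ih =>
      rw [ih, Nat.digits_def' (by norm_num : (1:ℕ) < 10) (Nat.pos_of_ne_zero h)]
      simp [Nat.ofDigits_append, Nat.ofDigits_cons, pow_succ]
      ring
  | case2 aux rev h =>
      simp at h
      simp [h]

theorem pvToDigitsCore_eq (fuel : Nat) : ∀ (n : Nat) (acc : List Char), 1 ≤ n → n ≤ fuel →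
    Nat.toDigitsCore 10 fuel n acc = ((Nat.digits 10 n).reverse.map Nat.digitChar) ++ acc := by
  induction fuel with
  | zero => intro n acc h1 h2; omega
  | succ fuel ih =>
    intro n acc h1 h2
    rw [Nat.toDigitsCore]
    by_cases h10 : n / 10 = 0
    · rw [if_pos h10]
      rw [Nat.digits_def' (by norm_num : (1:ℕ) < 10) (by omega), h10]
      simp
    · rw [if_neg h10]
      rw [ih (n / 10) _ (by omega) (by omega)]
      conv_rhs => rw [Nat.digits_def' (by norm_num : (1:ℕ) < 10) (show 0 < n by omega)]
      simp

theorem pvDigitChar_inj {a b : Nat} (ha : a < 10) (hb : b < 10) (h : Nat.digitChar a = Nat.digitChar b) :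
    a = b := by
  interval_cases a <;> interval_cases b <;> simp_all [Nat.digitChar]

theorem pvMap_digitChar_inj : ∀ (l1 l2 : List Nat), (∀ x ∈ l1, x < 10) → (∀ x ∈ l2, x < 10) →
    l1.map Nat.digitChar = l2.map Nat.digitChar → l1 = l2 := by
  intro l1
  induction l1 with
  | nil => intro l2 _ _ h; cases l2 <;> simp_all
  | cons a t ih =>
    intro l2 h1 h2 h
    cases l2 with
    | nil => simp_all
    | cons b t2 =>
      simp only [List.map_cons, List.cons.injEq] at h
      have := pvDigitChar_inj (h1 a (by simp)) (h2 b (by simp)) h.1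
      rw [this, ih t2 (fun x hx => h1 x (by simp [hx])) (fun x hx => h2 x (by simp [hx])) h.2]

theorem pvPalin_iff (n : Nat) :
    (n = Nat.ofDigits 10 (Nat.digits 10 n).reverse) ↔ ((Nat.digits 10 n).reverse = Nat.digits 10 n) := by
  constructor
  · intro h
    rcases Nat.eq_zero_or_pos n with h0 | hpos
    · simp [h0]
    have hd := Nat.digits_def' (by norm_num : (1:ℕ) < 10) hpos
    by_cases hh : n % 10 = 0
    · exfalso
      have hlen : (Nat.digits 10 n).length = (Nat.digits 10 (n / 10)).length + 1 := by
        rw [hd]; simp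
      have hrev : (Nat.digits 10 n).reverse = (Nat.digits 10 (n / 10)).reverse ++ [0] := by
        rw [hd, hh]; simp
      have hlt := Nat.ofDigits_lt_base_pow_length (b := 10) (l := (Nat.digits 10 (n/10)).reverse)
        (by norm_num) (fun x hx => Nat.digits_lt_base (by norm_num) (List.mem_reverse.mp hx))
      have hsmall : Nat.ofDigits 10 (Nat.digits 10 n).reverse < 10 ^ (Nat.digits 10 (n/10)).length := by
        rw [hrev, Nat.ofDigits_append]
        simpa using hlt
      rw [← h] at hsmall
      have := (Nat.digits_length_le_iff (by norm_num : (1:ℕ) < 10) n).mpr hsmall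
      omega
    · have hne : (Nat.digits 10 n).reverse ≠ [] := by
        simp [hd]
      have := Nat.digits_ofDigits 10 (by norm_num) (Nat.digits 10 n).reverse
        (by intro x hx; exact Nat.digits_lt_base (by norm_num) (List.mem_reverse.mp hx))
        (by intro hne'
            simp only [List.getLast_reverse]
            simp [hd, hh])
      rw [← h] at this
      exact this.symm
  · intro h
    conv_lhs => rw [← Nat.ofDigits_digits 10 n]
    rw [h]

-- A's palindrome test and B's string-reversal test agree on nonnegative numbers.
theorem pvTests_agree (n : Nat) :
    ((n : Int) = ((pvRevLoop n 0 : Nat) : Int)) ↔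
      (PySem.Int.toChars (n : Int) = (PySem.Int.toChars (n : Int)).reverse) := by
  have hrev : pvRevLoop n 0 = Nat.ofDigits 10 (Nat.digits 10 n).reverse := by
    simp [pvRevLoop_eq]
  rcases Nat.eq_zero_or_pos n with h0 | hpos
  · subst h0
    have h1 : pvRevLoop 0 0 = 0 := by rw [pvRevLoop]; simp
    rw [h1]
    simp only [Nat.cast_zero]
    constructor
    · intro _; decide
    · intro _; trivial
  · have hchars : PySem.Int.toChars (n : Int) = (Nat.digits 10 n).reverse.map Nat.digitChar := by
      simp only [PySem.Int.toChars, if_neg (by omega : ¬ ((n : Int) < 0)), Int.toNat_natCast]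
      rw [Nat.toDigits, pvToDigitsCore_eq (n + 1) n [] hpos (by omega)]
      simp
    rw [hchars, hrev]
    have hdig : ∀ x ∈ Nat.digits 10 n, x < 10 :=
      fun x hx => Nat.digits_lt_base (by norm_num) hx
    constructor
    · intro h
      have hn : n = Nat.ofDigits 10 (Nat.digits 10 n).reverse := by exact_mod_cast h
      have hpal := (pvPalin_iff n).mp hn
      rw [hpal]
      conv_lhs => rw [← hpal]
      rw [List.map_reverse]
    · intro h
      have : (Nat.digits 10 n).reverse = Nat.digits 10 n := by
        apply pvMap_digitChar_inj _ _ (fun x hx => hdig x (List.mem_reverse.mp hx)) hdig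
        rw [h, List.map_reverse]
        simp
      have := (pvPalin_iff n).mpr this
      exact_mod_cast this

-- Characterization of A's trial-division loop.
theorem pvPrimeLoop_iff (n d : Nat) :
    pvPrimeLoop n d = true ↔ ∀ k, d ≤ k → k * k ≤ n → n % k ≠ 0 := by
  fun_induction pvPrimeLoop n d with
  | case1 d hle hdvd =>
      simp only [Bool.false_eq_true, false_iff]
      push Not
      exact ⟨d, le_rfl, hle, hdvd⟩
  | case2 d hle hdvd ih =>
      rw [ih]
      constructor
      · intro h k hk hkk
        rcases Nat.eq_or_lt_of_le hk with rfl | hlt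
        · exact hdvd
        · exact h k (by omega) hkk
      · intro h k hk hkk
        exact h k (by omega) hkk
  | case3 d hle =>
      simp only [true_iff]
      intro k hk hkk hmod
      have h1 : d * d ≤ k * k := Nat.mul_le_mul hk hk
      omega

-- Characterization of B's odd-step scan.
theorem pvOddScan_iff (n d : Nat) : d % 2 = 1 →
    (n < pvOddScan n d * pvOddScan n d ↔ ∀ k, d ≤ k → k % 2 = 1 → k * k ≤ n → n % k ≠ 0) := by
  fun_induction pvOddScan n d with
  | case1 d hg ih =>
      intro hd
      rw [ih (by omega)]
      constructor
      · intro h k hk hko hkk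
        rcases Nat.eq_or_lt_of_le hk with rfl | hlt
        · exact hg.2
        · exact h k (by omega) hko hkk
      · intro h k hk hko hkk
        exact h k (by omega) hko hkk
  | case2 d hg =>
      intro hd
      push Not at hg
      by_cases hdd : d * d ≤ n
      · have hmod : n % d = 0 := hg hdd
        constructor
        · intro h; omega
        · intro h; exact absurd hmod (h d le_rfl hd hdd)
      · constructor
        · intro _ k hk _ hkk hmod
          have h1 : d * d ≤ k * k := Nat.mul_le_mul hk hk
          omega
        · intro _; omega

-- A's loop from 2 equals B's even-elimination plus odd scan from 3.
theorem pvLoops_agree (n : Nat) :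
    pvPrimeLoop n 2 = true ↔ (¬ (4 ≤ n ∧ n % 2 = 0) ∧ n < pvOddScan n 3 * pvOddScan n 3) := by
  rw [pvPrimeLoop_iff, pvOddScan_iff n 3 (by norm_num)]
  constructor
  · intro h
    refine ⟨?_, ?_⟩
    · rintro ⟨h4, h2⟩
      exact h 2 (by omega) (by omega) h2
    · intro k hk _ hkk
      exact h k (by omega) hkk
  · rintro ⟨hev, hodd⟩ k hk hkk hmod
    rcases Nat.even_or_odd k with he | ho
    · have h2k : 2 ∣ k := he.two_dvd
      have hkn : k ∣ n := Nat.dvd_of_mod_eq_zero hmod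
      have h2n : (2 : Nat) ∣ n := h2k.trans hkn
      have h4 : 2 * 2 ≤ k * k := Nat.mul_le_mul hk hk
      exact hev ⟨by omega, by omega⟩
    · have hko : k % 2 = 1 := Nat.odd_iff.mp ho
      exact hodd k (by omega) hko hkk hmod

-- ===== VERDICT (by name: the statement is the Claim_ definition above) =====
theorem solve_spec : Claim_equal_solve := by
  intro input _ hpre
  unfold Spec_solve solve solve_alt
  unfold Pre_solve at hpre
  cases hx : PySem.Dict.get? (PySem.Dict.mk input) "X" with
  | none => simp
  | some x =>
    rw [hx] at hpre
    simp only [Option.getD] at hpre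
    set n := x.toNat with hn
    have hxn : x = (n : Int) := by omega
    simp only [hxn, Int.toNat_natCast]
    by_cases hp : ((n : Int) = ((pvRevLoop n 0 : Nat) : Int))
    · have h2 := (pvTests_agree n).mp hp
      rw [if_neg (not_not_intro hp), if_neg (not_not_intro h2)]
      by_cases hev : (4 ≤ (n : Int) ∧ (n : Int) % 2 = 0)
      · have hev' : 4 ≤ n ∧ n % 2 = 0 := by
          obtain ⟨ha, hb⟩ := hev
          constructor
          · exact_mod_cast ha
          · omega
        have hfalse : pvPrimeLoop n 2 = false := by
          rcases Bool.eq_false_or_eq_true (pvPrimeLoop n 2) with h | h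
          · exact absurd ((pvLoops_agree n).mp h).1 (not_not_intro hev')
          · exact h
        rw [hfalse, if_pos hev]
        simp
      · have hev' : ¬ (4 ≤ n ∧ n % 2 = 0) := by
          rintro ⟨h4, h2m⟩
          exact hev ⟨by exact_mod_cast h4, by omega⟩
        rw [if_neg hev]
        by_cases hs : n < pvOddScan n 3 * pvOddScan n 3
        · have htrue : pvPrimeLoop n 2 = true := (pvLoops_agree n).mpr ⟨hev', hs⟩
          rw [htrue, if_pos (show (n : Int) < ((pvOddScan n 3 * pvOddScan n 3 : Nat) : Int) by exact_mod_cast hs)]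
          simp
        · have hfalse : pvPrimeLoop n 2 = false := by
            rcases Bool.eq_false_or_eq_true (pvPrimeLoop n 2) with h | h
            · exact absurd ((pvLoops_agree n).mp h).2 hs
            · exact h
          rw [hfalse, if_neg (show ¬ ((n : Int) < ((pvOddScan n 3 * pvOddScan n 3 : Nat) : Int)) by exact_mod_cast hs)]
          simp
    · have h2 : PySem.Int.toChars (n : Int) ≠ (PySem.Int.toChars (n : Int)).reverse :=
        fun h => hp ((pvTests_agree n).mpr h)
      rw [if_pos hp, if_pos h2]
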